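-- pv_equiv track=rewrite | github.com/petezh/Neural-Cryptanalysis | model/vigModel.py | autocorrelate
-- ===== SOURCE A (Python) =====
-- def autocorrelate(a): #create autocorrelation counts for
--     n = 20 #maximum length of key
--     n *= 10
--     li = [0]
--     for x in range(1,n):
--         corr = 0
--         shift = a[x:]
--         for i in range(len(shift)):
--             if shift[i] == a[i]:
--                 corr += 1
--         li.append(corr)
--     li[0] = max(li)
--     return li
-- ===== SOURCE B (Python) =====
-- def autocorrelate(a):
--     # One windowed pass over index pairs, tallying matches into a distance
--     # histogram, instead of 199 shifted rescans of the list.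
--     counts = [0] * 200
--     for q in range(1, len(a)):
--         for p in range(max(0, q - 199), q):
--             if a[p] == a[q]:
--                 counts[q - p] += 1
--     counts[0] = max(counts)
--     return counts
-- ===== Notes on version B (the rewrite author's own statement) =====
-- stated objective: alternative
-- what changed: Instead of rescanning the list once per shift (199 slice-and-compare passes appended to a list), B makes a single pass over index pairs within a 199-wide window and tallies each match into a preallocated distance histogram.
import Mathlib
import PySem

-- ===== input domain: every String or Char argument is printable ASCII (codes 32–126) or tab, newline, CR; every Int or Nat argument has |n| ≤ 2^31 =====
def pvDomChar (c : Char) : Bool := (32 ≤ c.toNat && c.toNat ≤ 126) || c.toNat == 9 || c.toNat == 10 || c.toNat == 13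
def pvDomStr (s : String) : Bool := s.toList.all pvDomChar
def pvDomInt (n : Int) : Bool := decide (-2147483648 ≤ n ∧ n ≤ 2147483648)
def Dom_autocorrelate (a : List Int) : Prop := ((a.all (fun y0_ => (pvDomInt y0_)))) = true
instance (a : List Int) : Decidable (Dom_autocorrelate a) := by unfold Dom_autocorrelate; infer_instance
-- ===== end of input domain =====

-- B replaces A's 199 slice-and-compare passes by one windowed pass over index
-- pairs that tallies matches into a preallocated distance histogram (objective:
-- alternative decomposition, same asymptotic cost).

-- ===== PORT A =====
-- n = 20; n *= 10 gives n = 200, so range(1, n) = [1, …, 199].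
-- a[x:] with x ≥ 0 is List.drop x; shift[i] / a[i] are always in range here,
-- so getD is exact; max(li) on a nonempty list is PySem.List.max?.
def autocorrelate (a : List Int) : List Int :=
  let li := (List.range' 1 199).foldl (fun li x =>
      let shift := a.drop x
      let corr := (List.range shift.length).foldl
        (fun corr i => if shift.getD i 0 = a.getD i 0 then corr + 1 else corr) (0 : Int)
      li ++ [corr]) [(0 : Int)]
  li.set 0 ((PySem.List.max? li (fun y => y)).getD 0)   -- li[0] = max(li)

-- ===== PORT B =====
-- counts = [0]*200; for q in range(1, len(a)): for p in range(max(0, q-199), q):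
-- range(max(0, q-199), q) = List.range' (q-199) (min q 199) in ℕ (truncated
-- subtraction is exactly max(0, q-199)); indices p, q, q-p are in range, so
-- getD / set are exact; counts[0] = max(counts) as in A.
def autocorrelate_alt (a : List Int) : List Int :=
  let counts := List.replicate 200 (0 : Int)
  let counts := (List.range' 1 (a.length - 1)).foldl (fun counts q =>
      (List.range' (q - 199) (min q 199)).foldl (fun counts p =>
        if a.getD p 0 = a.getD q 0 then
          counts.set (q - p) (counts.getD (q - p) 0 + 1)
        else counts) counts) counts
  counts.set 0 ((PySem.List.max? counts (fun y => y)).getD 0)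

-- ===== PRECONDITION & SPEC =====
def Spec_autocorrelate (a : List Int) (out : List Int) : Prop := out = autocorrelate_alt a
instance (a : List Int) (out : List Int) : Decidable (Spec_autocorrelate a out) := by unfold Spec_autocorrelate; infer_instance

-- ===== CLAIM (what is proved, stated in full; the proofs are below) =====
def Claim_equal_autocorrelate : Prop := ∀ (a : List Int), Dom_autocorrelate a → Spec_autocorrelate a (autocorrelate a)

-- ===== LEMMAS AND PROOFS =====

-- the common characterisation: number of i < len(a) - d with a[i+d] = a[i]
def pvCnt (a : List Int) (d : ℕ) : ℕ :=
  (List.range (a.length - d)).countP (fun i => decide (a.getD (d + i) 0 = a.getD i 0))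

-- A's inner loop computes pvCnt a x
theorem pv_corr_eq (a : List Int) (x : ℕ) :
    (List.range (a.drop x).length).foldl
      (fun corr i => if (a.drop x).getD i 0 = a.getD i 0 then corr + 1 else corr) (0 : Int)
    = (pvCnt a x : Int) := by
  have h := PySem.List.foldl_count_if
      (fun i => decide ((a.drop x).getD i 0 = a.getD i 0)) (List.range (a.drop x).length) 0
  simp only [decide_eq_true_eq] at h
  rw [h, zero_add]
  simp only [pvCnt, List.length_drop]
  congr 1
  apply List.countP_congr
  intro i _
  simp [List.getD_eq_getElem?_getD, List.getElem?_drop]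

-- A's list before the max fix-up
theorem pv_A_pre (a : List Int) :
    (List.range' 1 199).foldl (fun li x =>
      li ++ [(List.range (a.drop x).length).foldl
        (fun corr i => if (a.drop x).getD i 0 = a.getD i 0 then corr + 1 else corr) (0 : Int)])
      [(0 : Int)]
    = 0 :: (List.range' 1 199).map (fun d => (pvCnt a d : Int)) := by
  rw [PySem.List.foldl_append_singleton_eq_map]
  simp only [List.singleton_append, List.cons.injEq, true_and]
  exact List.map_congr_left (fun x _ => pv_corr_eq a x)

-- B's inner-loop update step
def pvUpd (a : List Int) (q : ℕ) (counts : List Int) (p : ℕ) : List Int :=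
  if a.getD p 0 = a.getD q 0 then counts.set (q - p) (counts.getD (q - p) 0 + 1) else counts

theorem pv_upd_length (a : List Int) (q : ℕ) (counts : List Int) (p : ℕ) :
    (pvUpd a q counts p).length = counts.length := by
  unfold pvUpd; split <;> simp

theorem pv_inner_length (a : List Int) (q : ℕ) (ps : List ℕ) (counts : List Int) :
    (ps.foldl (pvUpd a q) counts).length = counts.length := by
  induction ps generalizing counts with
  | nil => rfl
  | cons p ps ih => rw [List.foldl_cons, ih, pv_upd_length]

theorem pv_set_getD_ne (counts : List Int) (e d : ℕ) (v : Int) (h : e ≠ d) :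
    (counts.set e v).getD d 0 = counts.getD d 0 := by
  simp [List.getD_eq_getElem?_getD, h]

theorem pv_set_getD_eq (counts : List Int) (d : ℕ) (v : Int) (h : d < counts.length) :
    (counts.set d v).getD d 0 = v := by
  simp [List.getD_eq_getElem?_getD, h]

-- entry d of counts after B's inner loop over ps
theorem pv_inner_getD (a : List Int) (q d : ℕ) (ps : List ℕ) (counts : List Int)
    (hd : d < counts.length) :
    (ps.foldl (pvUpd a q) counts).getD d 0
    = counts.getD d 0
      + (ps.countP (fun p => (q - p == d) && decide (a.getD p 0 = a.getD q 0)) : Int) := by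
  induction ps generalizing counts with
  | nil => simp
  | cons p ps ih =>
    rw [List.foldl_cons, List.countP_cons,
        ih _ (by rw [pv_upd_length]; exact hd)]
    unfold pvUpd
    by_cases hm : a.getD p 0 = a.getD q 0
    · rw [if_pos hm]
      by_cases he : q - p = d
      · rw [he, pv_set_getD_eq _ _ _ hd]
        have hb : ((d == d) && decide (a.getD p 0 = a.getD q 0)) = true := by
          simp only [beq_self_eq_true, Bool.true_and, decide_eq_true_eq]
          exact hm
        rw [hb, if_pos rfl]
        push_cast
        ring
      · rw [pv_set_getD_ne _ _ _ _ he]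
        have hb : ((q - p == d) && decide (a.getD p 0 = a.getD q 0)) = false := by
          simp only [Bool.and_eq_false_iff, beq_eq_false_iff_ne, ne_eq]
          exact Or.inl he
        rw [hb, if_neg (by simp)]
        push_cast
        ring
    · rw [if_neg hm]
      have hb : ((q - p == d) && decide (a.getD p 0 = a.getD q 0)) = false := by
        simp only [Bool.and_eq_false_iff, decide_eq_false_iff_not]
        exact Or.inr hm
      rw [hb, if_neg (by simp)]
      push_cast
      ring

-- entry d of counts after B's outer loop
theorem pv_outer_getD (a : List Int) (d : ℕ) (qs : List ℕ) (counts : List Int)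
    (hd : d < counts.length) :
    (qs.foldl (fun counts q => (List.range' (q - 199) (min q 199)).foldl (pvUpd a q) counts) counts).getD d 0
    = counts.getD d 0
      + ((qs.map (fun q =>
          ((List.range' (q - 199) (min q 199)).countP
            (fun p => (q - p == d) && decide (a.getD p 0 = a.getD q 0)) : Int))).sum) := by
  induction qs generalizing counts with
  | nil => simp
  | cons q qs ih =>
    rw [List.foldl_cons, List.map_cons, List.sum_cons,
        ih _ (by rw [pv_inner_length]; exact hd),
        pv_inner_getD a q d _ _ hd]
    ring

-- the inner count is an indicator, for 1 ≤ d ≤ 199 and q ≥ 1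
theorem pv_inner_indicator (a : List Int) (q d : ℕ) (hd1 : 1 ≤ d) (hd2 : d ≤ 199) (hq : 1 ≤ q) :
    (List.range' (q - 199) (min q 199)).countP
      (fun p => (q - p == d) && decide (a.getD p 0 = a.getD q 0))
    = if (d ≤ q) ∧ a.getD (q - d) 0 = a.getD q 0 then 1 else 0 := by
  have hcongr : (List.range' (q - 199) (min q 199)).countP
      (fun p => (q - p == d) && decide (a.getD p 0 = a.getD q 0))
    = (List.range' (q - 199) (min q 199)).countP
      (fun p => (p == q - d) && decide ((d ≤ q) ∧ a.getD (q - d) 0 = a.getD q 0)) := by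
    apply List.countP_congr
    intro p hp
    rw [List.mem_range'_1] at hp
    have hpq : p < q := by omega
    simp only [Bool.and_eq_true, beq_iff_eq, decide_eq_true_eq]
    constructor
    · rintro ⟨h1, h2⟩
      have hpd : p = q - d := by omega
      exact ⟨hpd, by omega, hpd ▸ h2⟩
    · rintro ⟨h1, h2, h3⟩
      subst h1
      exact ⟨by omega, h3⟩
  rw [hcongr]
  by_cases hc : (d ≤ q) ∧ a.getD (q - d) 0 = a.getD q 0
  · rw [if_pos hc]
    have hcount : (List.range' (q - 199) (min q 199)).countP
        (fun p => (p == q - d) && decide ((d ≤ q) ∧ a.getD (q - d) 0 = a.getD q 0))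
      = (List.range' (q - 199) (min q 199)).count (q - d) := by
      apply List.countP_congr
      intro p _
      rw [decide_eq_true hc, Bool.and_true]
    rw [hcount, List.Nodup.count (List.nodup_range' 1)]
    rw [if_pos]
    rw [List.mem_range'_1]
    omega
  · rw [if_neg hc]
    apply List.countP_eq_zero.mpr
    intro p _
    rw [decide_eq_false hc, Bool.and_false]
    exact Bool.false_ne_true

-- indicator sum over q reindexes to pvCnt, for 1 ≤ d ≤ 199
theorem pv_sum_indicator (a : List Int) (d : ℕ) (hd1 : 1 ≤ d) (hd2 : d ≤ 199) :
    (List.range' 1 (a.length - 1)).countP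
      (fun q => decide ((d ≤ q) ∧ a.getD (q - d) 0 = a.getD q 0))
    = pvCnt a d := by
  unfold pvCnt
  by_cases hL : a.length ≤ d
  · have h1 : a.length - d = 0 := by omega
    rw [h1]
    simp only [List.range_zero, List.countP_nil]
    apply List.countP_eq_zero.mpr
    intro q hq
    rw [List.mem_range'_1] at hq
    simp only [decide_eq_true_eq]
    rintro ⟨h2, -⟩
    omega
  · rw [Nat.not_le] at hL
    have hsplit : List.range' 1 (d - 1) ++ List.range' d (a.length - d) = List.range' 1 (a.length - 1) := by
      have h := List.range'_append (s := 1) (m := d - 1) (n := a.length - d) (step := 1)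
      rw [show 1 + 1 * (d - 1) = d by omega, show d - 1 + (a.length - d) = a.length - 1 by omega] at h
      exact h
    rw [← hsplit, List.countP_append]
    have hz : (List.range' 1 (d - 1)).countP
        (fun q => decide ((d ≤ q) ∧ a.getD (q - d) 0 = a.getD q 0)) = 0 := by
      apply List.countP_eq_zero.mpr
      intro q hq
      rw [List.mem_range'_1] at hq
      simp only [decide_eq_true_eq]
      rintro ⟨h2, -⟩
      omega
    rw [hz, Nat.zero_add, List.range'_eq_map_range, List.countP_map]
    apply List.countP_congr
    intro i _
    simp only [Function.comp_apply, decide_eq_true_eq]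
    have h1 : d ≤ d + i := by omega
    have h2 : d + i - d = i := by omega
    rw [h2]
    constructor
    · rintro ⟨-, h3⟩
      exact h3.symm
    · intro h3
      exact ⟨h1, h3.symm⟩

theorem pv_outer_length (a : List Int) (qs : List ℕ) (counts : List Int) :
    (qs.foldl (fun counts q => (List.range' (q - 199) (min q 199)).foldl (pvUpd a q) counts) counts).length
    = counts.length := by
  induction qs generalizing counts with
  | nil => rfl
  | cons q qs ih => rw [List.foldl_cons, ih, pv_inner_length]

-- B's counts before the max fix-up
theorem pv_B_pre (a : List Int) :
    ((List.range' 1 (a.length - 1)).foldl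
      (fun counts q => (List.range' (q - 199) (min q 199)).foldl (pvUpd a q) counts)
      (List.replicate 200 (0 : Int)))
    = 0 :: (List.range' 1 199).map (fun d => (pvCnt a d : Int)) := by
  have hlen : ((List.range' 1 (a.length - 1)).foldl
      (fun counts q => (List.range' (q - 199) (min q 199)).foldl (pvUpd a q) counts)
      (List.replicate 200 (0 : Int))).length = 200 := by
    rw [pv_outer_length, List.length_replicate]
  have hlen2 : (0 :: (List.range' 1 199).map (fun d => (pvCnt a d : Int))).length = 200 := by
    rw [List.length_cons, List.length_map, List.length_range']
  apply List.ext_getElem (by rw [hlen, hlen2])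
  intro i h1 h2
  have hi : i < 200 := by rw [hlen] at h1; exact h1
  rw [← List.getD_eq_getElem _ 0 h1,
      pv_outer_getD a i _ _ (by rw [List.length_replicate]; exact hi)]
  have hrep : (List.replicate 200 (0 : Int)).getD i 0 = 0 := by
    rw [List.getD_eq_getElem _ 0 (by rw [List.length_replicate]; exact hi),
        List.getElem_replicate]
  rw [hrep, zero_add]
  rcases Nat.eq_zero_or_pos i with hz | hpos
  · subst hz
    have hzero : ∀ x ∈ (List.range' 1 (a.length - 1)).map (fun q =>
        ((List.range' (q - 199) (min q 199)).countP
          (fun p => (q - p == 0) && decide (a.getD p 0 = a.getD q 0)) : Int)), x = 0 := by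
      intro x hx
      obtain ⟨q, hq, rfl⟩ := List.mem_map.mp hx
      rw [List.mem_range'_1] at hq
      norm_cast
      apply List.countP_eq_zero.mpr
      intro p hp
      rw [List.mem_range'_1] at hp
      have hne : q - p ≠ 0 := by omega
      simp [hne]
    rw [List.sum_eq_zero hzero]
    rfl
  · have hi1 : 1 ≤ i := hpos
    have hi199 : i ≤ 199 := by omega
    have hmap : (List.range' 1 (a.length - 1)).map (fun q =>
        ((List.range' (q - 199) (min q 199)).countP
          (fun p => (q - p == i) && decide (a.getD p 0 = a.getD q 0)) : Int))
      = (List.range' 1 (a.length - 1)).map (fun q =>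
        if decide ((i ≤ q) ∧ a.getD (q - i) 0 = a.getD q 0) = true then (1 : Int) else 0) := by
      apply List.map_congr_left
      intro q hq
      rw [List.mem_range'_1] at hq
      rw [pv_inner_indicator a q i hi1 hi199 (by omega)]
      simp only [decide_eq_true_eq]
      split <;> rfl
    rw [hmap, PySem.List.sum_map_ite_one_zero, pv_sum_indicator a i hi1 hi199]
    obtain ⟨j, rfl⟩ : ∃ j, i = j + 1 := ⟨i - 1, by omega⟩
    rw [List.getElem_cons_succ, List.getElem_map, List.getElem_range']
    rw [show 1 + 1 * j = j + 1 by omega]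

-- ===== VERDICT (by name: the statement is the Claim_ definition above) =====
theorem autocorrelate_spec : Claim_equal_autocorrelate := by
  intro a _
  show autocorrelate a = autocorrelate_alt a
  have hB := pv_B_pre a
  unfold pvUpd at hB
  unfold autocorrelate autocorrelate_alt
  simp only [pv_A_pre a, hB]
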